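-- pv_equiv track=rewrite | github.com/sh95fit/CodingTest | 백준/Silver/2346. 풍선 터뜨리기/풍선 터뜨리기.py | solve_balloons
-- ===== SOURCE A (Python) =====
-- def solve_balloons(N, balloons):
--     balloons_status = list(range(1, N + 1))
--     exploded = []
--     current_idx = 0
--
--     while balloons_status:
--         current_balloon = balloons_status[current_idx]
--         exploded.append(current_balloon)
--         move = balloons[current_balloon - 1]
--         balloons_status.remove(current_balloon)
--
--         if len(balloons_status) > 0:
--             if move > 0:
--                 current_idx = (current_idx + move - 1) % len(balloons_status)
--             else:
--                 current_idx = (current_idx + move) % len(balloons_status)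
--
--     return exploded
-- ===== SOURCE B (Python) =====
-- from collections import deque
--
-- def solve_balloons(N, balloons):
--     d = deque(range(1, N + 1))
--     order = []
--     while d:
--         x = d.popleft()
--         order.append(x)
--         move = balloons[x - 1]
--         if d:
--             k = (move - 1) % len(d) if move > 0 else move % len(d)
--             d.rotate(-k)
--     return order
-- ===== Notes on version B (the rewrite author's own statement) =====
-- stated objective: faster
-- what changed: Replaces A's sorted status list plus maintained numeric index (with an O(n) remove scan and modular index arithmetic each step) by a rotating deque whose front is always the current balloon: pop left, then rotate by the move reduced modulo the remaining count.
import Mathlib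
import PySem

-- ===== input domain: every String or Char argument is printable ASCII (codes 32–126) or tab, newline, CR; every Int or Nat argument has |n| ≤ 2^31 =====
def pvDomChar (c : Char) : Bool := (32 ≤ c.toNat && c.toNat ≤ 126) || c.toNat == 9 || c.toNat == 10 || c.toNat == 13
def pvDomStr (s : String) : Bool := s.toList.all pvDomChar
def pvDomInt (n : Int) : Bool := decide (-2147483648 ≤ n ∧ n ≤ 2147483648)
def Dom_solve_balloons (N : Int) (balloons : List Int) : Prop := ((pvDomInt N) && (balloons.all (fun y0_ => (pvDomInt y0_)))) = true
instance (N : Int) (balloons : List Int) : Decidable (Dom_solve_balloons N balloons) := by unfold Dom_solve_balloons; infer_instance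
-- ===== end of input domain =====

-- B replaces A's sorted status list + maintained index (O(n) remove scan each step) by a
-- rotating deque whose front is always the current balloon (objective: faster, constant-factor).

-- ===== PORT A =====
-- while-loop ported as fuel recursion (fuel = N.toNat = initial list length, enough for every
-- iteration); the `none` branches are Python's IndexError/ValueError raises, excluded by Pre_.
def solveLoopA (balloons : List Int) : Nat → List Int → Int → List Int → List Int
  | 0, _, _, exploded => exploded
  | fuel + 1, status, idx, exploded =>
    if status.isEmpty then exploded
    else
      match PySem.List.pyGet? status idx with
      | none => exploded                                  -- IndexError (unreachable: idx kept in range)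
      | some cur =>
        match PySem.List.pyGet? balloons (cur - 1) with
        | none => exploded ++ [cur]                       -- IndexError, excluded by Pre_
        | some move =>
          match PySem.List.remove? status cur with
          | none => exploded ++ [cur]                     -- ValueError (unreachable: cur ∈ status)
          | some status' =>
            if 0 < status'.length then
              solveLoopA balloons fuel status'
                (if 0 < move then PySem.Int.mod (idx + move - 1) status'.length
                 else PySem.Int.mod (idx + move) status'.length)
                (exploded ++ [cur])
            else solveLoopA balloons fuel status' idx (exploded ++ [cur])

def solve_balloons (N : Int) (balloons : List Int) : List Int :=
  solveLoopA balloons N.toNat (PySem.List.pyRange 1 (N + 1) 1) 0 []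

-- ===== PORT B =====
-- deque ported as a list: popleft = head, d.rotate(-k) (0 ≤ k < len d) = List.rotate k (left rotation).
def solveLoopB (balloons : List Int) : Nat → List Int → List Int → List Int
  | 0, _, order => order
  | fuel + 1, d, order =>
    match d with
    | [] => order
    | x :: rest =>
      match PySem.List.pyGet? balloons (x - 1) with
      | none => order ++ [x]                              -- IndexError, excluded by Pre_
      | some move =>
        if rest.isEmpty then solveLoopB balloons fuel rest (order ++ [x])
        else
          solveLoopB balloons fuel
            (rest.rotate (if 0 < move then PySem.Int.mod (move - 1) rest.length
                          else PySem.Int.mod move rest.length).toNat)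
            (order ++ [x])

def solve_balloons_alt (N : Int) (balloons : List Int) : List Int :=
  solveLoopB balloons N.toNat (PySem.List.pyRange 1 (N + 1) 1) []

-- ===== PRECONDITION & SPEC =====
-- Pre_ excludes exactly the inputs on which A raises IndexError: when 0 < N and
-- balloons has fewer than N entries, some popped label looks past the end of balloons.
def Pre_solve_balloons (N : Int) (balloons : List Int) : Prop := N ≤ (balloons.length : Int)
instance (N : Int) (balloons : List Int) : Decidable (Pre_solve_balloons N balloons) := by
  unfold Pre_solve_balloons; infer_instance

def pvWitness_solve_balloons : Int × List Int := (3, [2, -1, 1])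

def Spec_solve_balloons (N : Int) (balloons : List Int) (out : List Int) : Prop := out = solve_balloons_alt N balloons
instance (N : Int) (balloons : List Int) (out : List Int) : Decidable (Spec_solve_balloons N balloons out) := by unfold Spec_solve_balloons; infer_instance

-- ===== CLAIM (what is proved, stated in full; the proofs are below) =====
def Claim_equal_solve_balloons : Prop := ∀ (N : Int) (balloons : List Int), Dom_solve_balloons N balloons → Pre_solve_balloons N balloons → Spec_solve_balloons N balloons (solve_balloons N balloons)

-- ===== LEMMAS AND PROOFS =====

theorem pv_rotate_congr {α : Type} (l : List α) (a b : Nat) (h : a % l.length = b % l.length) :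
    l.rotate a = l.rotate b := by
  rw [← List.rotate_mod l a, h, List.rotate_mod]

-- the tail of `l` rotated to position n is `l` minus position n, rotated to position n
theorem pv_eraseIdx_rotate {α : Type} (l : List α) (n : Nat) (h : n < l.length) :
    (l.eraseIdx n).rotate n = l.drop (n + 1) ++ l.take n := by
  have htk : (l.take n).length = n := by simp; omega
  rw [List.eraseIdx_eq_take_drop_succ,
      List.rotate_eq_drop_append_take (by simp at *; omega),
      List.drop_left' htk, List.take_left' htk]

-- shifting then reducing mod m equals reducing then shifting then reducing (Nat/Int mix)
theorem pv_mod_shift (n m : Nat) (a : Int) (hm : (0 : Int) < (m : Int)) :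
    (n + (PySem.Int.mod a m).toNat) % m = (PySem.Int.mod ((n : Int) + a) m).toNat := by
  rw [PySem.Int.mod_eq_emod_of_pos hm, PySem.Int.mod_eq_emod_of_pos hm]
  have hm0 : (m : Int) ≠ 0 := by omega
  have h1 : 0 ≤ a % (m : Int) := Int.emod_nonneg a hm0
  have h3 : 0 ≤ ((n : Int) + a) % (m : Int) := Int.emod_nonneg _ hm0
  have key : ((n : Int) + a % (m : Int)) % (m : Int) = ((n : Int) + a) % (m : Int) := by
    conv_lhs => rw [Int.emod_def a (m : Int)]
    rw [show (n : Int) + (a - (m : Int) * (a / (m : Int)))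
          = ((n : Int) + a) + (m : Int) * (-(a / (m : Int))) by ring,
        Int.add_mul_emod_self_left]
  have e1 : (((n + (a % (m : Int)).toNat) % m : Nat) : Int) = ((n : Int) + a % (m : Int)) % (m : Int) := by
    push_cast [Int.toNat_of_nonneg h1]; rfl
  rw [key] at e1
  omega

set_option maxRecDepth 8192 in
-- the loop invariant: B's deque is A's status list rotated so that the current balloon is in front
theorem pv_loop_eq (balloons : List Int) :
    ∀ (fuel : Nat) (l : List Int) (idx : Int) (acc : List Int),
      l.Nodup →
      (∀ x ∈ l, 1 ≤ x ∧ x ≤ (balloons.length : Int)) →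
      (l ≠ [] → 0 ≤ idx ∧ idx.toNat < l.length) →
      solveLoopA balloons fuel l idx acc = solveLoopB balloons fuel (l.rotate idx.toNat) acc := by
  intro fuel
  induction fuel with
  | zero => intro l idx acc _ _ _; simp [solveLoopA, solveLoopB]
  | succ fuel ih =>
    intro l idx acc hnd hmem hidx
    by_cases hl : l = []
    · subst hl; simp [solveLoopA, solveLoopB]
    obtain ⟨h0, hlt⟩ := hidx hl
    have hltI : idx < (l.length : Int) := by omega
    set n := idx.toNat with hn
    -- A reads the current balloon
    obtain ⟨cur, hget⟩ : ∃ c, PySem.List.pyGet? l idx = some c :=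
      ⟨_, PySem.List.pyGet?_eq_some_getElem l h0 hltI⟩
    have hcurval : cur = l[n]'hlt := by
      rw [PySem.List.pyGet?_eq_some_getElem l h0 hltI] at hget
      exact (Option.some_inj.mp hget).symm
    have hcurmem : cur ∈ l := hcurval ▸ List.getElem_mem hlt
    obtain ⟨hc1, hc2⟩ := hmem cur hcurmem
    obtain ⟨move, hbget⟩ : ∃ mv, PySem.List.pyGet? balloons (cur - 1) = some mv :=
      ⟨_, PySem.List.pyGet?_eq_some_getElem balloons (by omega) (by omega)⟩
    -- A removes it: with distinct labels, removing the first occurrence is removing position n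
    have hrem : PySem.List.remove? l cur = some (l.eraseIdx n) := by
      rw [PySem.List.remove?_eq_some_erase l cur hcurmem, ← List.eraseIdx_idxOf_eq_erase,
        hcurval, List.Nodup.idxOf_getElem hnd n hlt]
    -- B's deque is cur followed by the rest of the circle
    have hrot : l.rotate n = cur :: (l.drop (n + 1) ++ l.take n) := by
      rw [List.rotate_eq_drop_append_take (Nat.le_of_lt hlt), List.drop_eq_getElem_cons hlt,
        ← hcurval]
      simp
    have hrest : l.drop (n + 1) ++ l.take n = (l.eraseIdx n).rotate n :=
      (pv_eraseIdx_rotate l n hlt).symm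
    have hlen' : (l.eraseIdx n).length = l.length - 1 := List.length_eraseIdx_of_lt hlt
    have hrestlen : (l.drop (n + 1) ++ l.take n).length = l.length - 1 := by simp; omega
    by_cases hm : l.length - 1 = 0
    · -- last balloon: both loops continue with the empty list
      have hrestnil : l.drop (n + 1) ++ l.take n = [] :=
        List.eq_nil_of_length_eq_zero (by omega)
      have hernil : l.eraseIdx n = [] := by
        have := hlen'; exact List.eq_nil_of_length_eq_zero (by omega)
      simp only [solveLoopA, solveLoopB, hrot, hrestnil, hget, hbget, hrem, hernil,
        List.isEmpty_iff, hl, List.length_nil]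
      simp only [if_pos trivial, Nat.lt_irrefl]
      have := ih [] idx (acc ++ [cur]) (by simp) (by simp) (by simp)
      simpa [List.rotate_nil] using this
    · -- still balloons left: A updates the index, B rotates; the two agree modulo the new length
      have hmpos : 0 < l.length - 1 := Nat.pos_of_ne_zero hm
      set m : Nat := l.length - 1 with hmdef
      have hmI : (0 : Int) < ((l.eraseIdx n).length : Int) := by rw [hlen']; omega
      have hrestne : l.drop (n + 1) ++ l.take n ≠ [] := by
        intro hcontra; rw [hcontra] at hrestlen; simp at hrestlen; omega
      -- the new index A computes
      set a : Int := if (0 : Int) < move then move - 1 else move with ha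
      have hidxA : (if (0 : Int) < move then PySem.Int.mod (idx + move - 1) ((l.eraseIdx n).length : Int)
                    else PySem.Int.mod (idx + move) ((l.eraseIdx n).length : Int))
                  = PySem.Int.mod ((n : Int) + a) ((l.eraseIdx n).length : Int) := by
        have hin : idx = (n : Int) := by omega
        by_cases hmv : (0 : Int) < move
        · simp [ha, hmv, hin]
          ring_nf
        · simp [ha, hmv, hin]
      set idx' : Int := PySem.Int.mod ((n : Int) + a) ((l.eraseIdx n).length : Int) with hidx'
      have hidx'0 : 0 ≤ idx' := PySem.Int.mod_nonneg _ hmI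
      have hidx'lt : idx' < ((l.eraseIdx n).length : Int) := PySem.Int.mod_lt _ hmI
      -- B's rotation amount
      have hkB : (if (0 : Int) < move then PySem.Int.mod (move - 1) ((l.drop (n + 1) ++ l.take n).length : Int)
                  else PySem.Int.mod move ((l.drop (n + 1) ++ l.take n).length : Int))
                = PySem.Int.mod a m := by
        rw [hrestlen]
        by_cases hmv : (0 : Int) < move <;> simp [ha, hmv]
      -- the rotated rest equals the erased list rotated to A's new index
      have hrots : (l.drop (n + 1) ++ l.take n).rotate (PySem.Int.mod a m).toNat
                 = (l.eraseIdx n).rotate idx'.toNat := by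
        rw [hrest, List.rotate_rotate]
        apply pv_rotate_congr
        rw [hlen']
        have hcastlen : (((l.eraseIdx n).length : Nat) : Int) = (m : Int) := by
          rw [hlen']
        have hidx'' : idx' = PySem.Int.mod ((n : Int) + a) (m : Int) := by
          rw [hidx', hcastlen]
        have hlt2 : idx'.toNat < m := by
          have := PySem.Int.mod_lt ((n : Int) + a) (show (0 : Int) < (m : Int) by omega)
          rw [hidx'']
          omega
        rw [Nat.mod_eq_of_lt hlt2, pv_mod_shift n m a (by omega), hidx'']
      -- unfold one iteration on each side
      rw [show solveLoopA balloons (fuel + 1) l idx acc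
            = solveLoopA balloons fuel (l.eraseIdx n) idx' (acc ++ [cur]) by
          simp only [solveLoopA, List.isEmpty_iff, if_neg hl, hget, hbget, hrem]
          rw [if_pos (by omega : 0 < (l.eraseIdx n).length), hidxA]]
      rw [show solveLoopB balloons (fuel + 1) (l.rotate n) acc
            = solveLoopB balloons fuel
                ((l.drop (n + 1) ++ l.take n).rotate (PySem.Int.mod a m).toNat) (acc ++ [cur]) by
          rw [hrot]
          simp only [solveLoopB, hbget]
          rw [if_neg (by simpa [List.isEmpty_iff] using hrestne), hkB]]
      rw [hrots]
      exact ih (l.eraseIdx n) idx' (acc ++ [cur])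
        (hnd.sublist (List.eraseIdx_sublist l n))
        (fun x hx => hmem x ((List.eraseIdx_sublist l n).mem hx))
        (fun _ => ⟨hidx'0, by omega⟩)

-- ===== VERDICT (by name: the statement is the Claim_ definition above) =====
theorem solve_balloons_spec : Claim_equal_solve_balloons := by
  intro N balloons _ hpre
  unfold Spec_solve_balloons solve_balloons solve_balloons_alt
  have h := pv_loop_eq balloons N.toNat (PySem.List.pyRange 1 (N + 1) 1) 0 []
    (PySem.List.nodup_pyRange_one 1 (N + 1))
    (by
      intro x hx
      rw [PySem.List.mem_pyRange_one] at hx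
      exact ⟨hx.1, by unfold Pre_solve_balloons at hpre; omega⟩)
    (by
      intro hne
      refine ⟨le_refl 0, ?_⟩
      rw [PySem.List.length_pyRange_one]
      by_contra hcon
      exact hne (List.eq_nil_of_length_eq_zero (by
        rw [PySem.List.length_pyRange_one]; omega)))
  simpa [List.rotate_zero] using h
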